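-- pv_equiv track=rewrite | github.com/DrumJB/AdventOfCode2023 | day07/day07.py | three_pair
-- ===== SOURCE A (Python) =====
-- def three_pair(hand):
--     types = []
--     jokers = 0
--     for h in hand:
--         a = True
--         for t in types:
--             if h == t[0]:
--                 t[1] += 1
--                 a = False
--         if a:
--             types.append([h, 1])
--         if h == 0:
--             jokers += 1
--     for t in types:
--         if (t[1]+jokers) == 3:
--             return True
--     return False
-- ===== SOURCE B (Python) =====
-- def three_pair(hand):
--     s = sorted(hand)
--     jokers = hand.count(0)
--     if not s:
--         return False
--     cur = s[0]
--     run = 1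
--     for x in s[1:]:
--         if x == cur:
--             run += 1
--         else:
--             if run + jokers == 3:
--                 return True
--             cur, run = x, 1
--     return run + jokers == 3
-- ===== Notes on version B (the rewrite author's own statement) =====
-- stated objective: faster
-- what changed: Replaces A's quadratic membership-scan count table (nested loop mutating a list of [value,count] pairs) with sort-then-group: one pass over the sorted hand tracking run lengths, checking run+jokers==3 at each run boundary.
import Mathlib
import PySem

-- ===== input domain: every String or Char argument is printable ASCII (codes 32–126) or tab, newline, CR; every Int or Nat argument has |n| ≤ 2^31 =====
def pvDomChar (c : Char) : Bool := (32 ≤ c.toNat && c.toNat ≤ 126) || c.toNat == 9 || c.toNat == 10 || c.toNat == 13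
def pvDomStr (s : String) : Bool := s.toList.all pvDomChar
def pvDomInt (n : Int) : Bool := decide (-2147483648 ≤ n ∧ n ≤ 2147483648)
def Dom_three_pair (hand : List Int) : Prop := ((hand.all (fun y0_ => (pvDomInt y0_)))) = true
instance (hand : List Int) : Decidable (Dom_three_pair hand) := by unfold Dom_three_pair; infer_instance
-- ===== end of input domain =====

-- Header: B sorts the hand and makes one grouped pass over runs instead of A's
-- quadratic list-of-[value,count] membership scans; same return value, O(n log n) instead of O(n^2).

-- ===== PORT A =====
-- inner 'for t in types: if h == t[0]: t[1] += 1; a = False'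
def pvInnerA (h : Int) : List (Int × Int) → List (Int × Int) × Bool
  | [] => ([], true)
  | t :: ts =>
    let r := pvInnerA h ts
    if h == t.1 then ((t.1, t.2 + 1) :: r.1, false) else (t :: r.1, r.2)

-- final 'for t in types: if (t[1]+jokers) == 3: return True / return False'
def pvFinalA (jokers : Int) : List (Int × Int) → Bool
  | [] => false
  | t :: ts => if t.2 + jokers == 3 then true else pvFinalA jokers ts

-- main 'for h in hand' loop over state (types, jokers)
def pvLoopA : List Int → List (Int × Int) × Int → List (Int × Int) × Int
  | [], st => st
  | h :: rest, (types, jokers) =>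
    let r := pvInnerA h types
    let types2 := if r.2 then r.1 ++ [(h, 1)] else r.1
    pvLoopA rest (types2, if h == 0 then jokers + 1 else jokers)

def three_pair (hand : List Int) : Bool :=
  let st := pvLoopA hand ([], 0)
  pvFinalA st.2 st.1

-- ===== PORT B =====
-- 'for x in s[1:]' run-length pass of Source B
def pvRunB (jokers : Int) : List Int → Int → Int → Bool
  | [], _, run => run + jokers == 3
  | x :: xs, cur, run =>
    if x == cur then pvRunB jokers xs cur (run + 1)
    else if run + jokers == 3 then true else pvRunB jokers xs x 1

def three_pair_alt (hand : List Int) : Bool :=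
  let s := PySem.List.sorted hand (fun x => x) false
  let jokers : Int := (hand.count 0 : Int)
  match s with
  | [] => false
  | c :: rest => pvRunB jokers rest c 1

-- ===== PRECONDITION & SPEC =====
def Spec_three_pair (hand : List Int) (out : Bool) : Prop := out = three_pair_alt hand
instance (hand : List Int) (out : Bool) : Decidable (Spec_three_pair hand out) := by unfold Spec_three_pair; infer_instance

-- ===== CLAIM (what is proved, stated in full; the proofs are below) =====
def Claim_equal_three_pair : Prop := ∀ (hand : List Int), Dom_three_pair hand → Spec_three_pair hand (three_pair hand)

-- ===== LEMMAS AND PROOFS =====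

-- the common specification: some card value whose multiplicity plus the joker count is 3
def pvG (hand : List Int) : Prop :=
  ∃ v ∈ hand, (hand.count v : Int) + (hand.count 0 : Int) = 3

lemma pvInnerA_fst (h : Int) (ts : List (Int × Int)) :
    (pvInnerA h ts).1 = ts.map (fun t => if t.1 = h then (t.1, t.2 + 1) else t) := by
  induction ts with
  | nil => rfl
  | cons t ts ih =>
    by_cases hh : h = t.1
    · subst hh; simp [pvInnerA, ih]
    · have h2 : ¬ t.1 = h := fun e => hh e.symm
      simp [pvInnerA, hh, h2, ih]

lemma pvInnerA_snd (h : Int) (ts : List (Int × Int)) :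
    (pvInnerA h ts).2 = true ↔ h ∉ ts.map Prod.fst := by
  induction ts with
  | nil => simp [pvInnerA]
  | cons t ts ih =>
    simp only [pvInnerA]
    by_cases hh : h = t.1
    · simp [hh]
    · simp [hh, ih, Ne.symm hh]

lemma pvFinalA_iff (j : Int) (ts : List (Int × Int)) :
    pvFinalA j ts = true ↔ ∃ t ∈ ts, t.2 + j = 3 := by
  induction ts with
  | nil => simp [pvFinalA]
  | cons t ts ih =>
    simp only [pvFinalA]
    by_cases h3 : t.2 + j = 3
    · simp [h3]
    · simp [h3, ih]

lemma pvLoopA_spec (rest : List Int) (types : List (Int × Int)) (jokers : Int)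
    (hnd : (types.map Prod.fst).Nodup) :
    ((pvLoopA rest (types, jokers)).2 = jokers + (rest.count 0 : Int)) ∧
    (∀ v, v ∈ (pvLoopA rest (types, jokers)).1.map Prod.fst ↔ v ∈ types.map Prod.fst ∨ v ∈ rest) ∧
    (∀ t ∈ (pvLoopA rest (types, jokers)).1,
        (∃ t0 ∈ types, t0.1 = t.1 ∧ t.2 = t0.2 + (rest.count t.1 : Int)) ∨
        (t.1 ∉ types.map Prod.fst ∧ t.2 = (rest.count t.1 : Int))) := by
  induction rest generalizing types jokers with
  | nil =>
    refine ⟨by simp [pvLoopA], fun v => by simp [pvLoopA], fun t ht => ?_⟩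
    simp only [pvLoopA] at ht
    exact Or.inl ⟨t, ht, rfl, by simp⟩
  | cons h r ih =>
    by_cases ha : (pvInnerA h types).2 = true
    · -- h is a new key: types unchanged by the inner pass, then (h,1) appended
      have hnot : h ∉ types.map Prod.fst := (pvInnerA_snd h types).1 ha
      have hfst : (pvInnerA h types).1 = types := by
        rw [pvInnerA_fst]
        have : ∀ t ∈ types, (fun t : Int × Int => if t.1 = h then (t.1, t.2 + 1) else t) t = t := by
          intro t ht
          have : ¬ t.1 = h := fun e => hnot (e ▸ List.mem_map_of_mem ht)
          simp [this]
        simp [List.map_congr_left this]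
      have hnd2 : ((types ++ [(h, 1)]).map Prod.fst).Nodup := by
        simp only [List.map_append, List.map_cons, List.map_nil]
        simp only [List.nodup_append, hnd, true_and]
        refine ⟨List.nodup_singleton _, ?_⟩
        intro a ha b hb e
        have hbh : b = h := by simpa using hb
        exact hnot (hbh ▸ e ▸ ha)
      have hstep : pvLoopA (h :: r) (types, jokers)
          = pvLoopA r (types ++ [(h, 1)], if h == 0 then jokers + 1 else jokers) := by
        simp [pvLoopA, ha, hfst]
      rw [hstep]
      obtain ⟨hJ, hK, hV⟩ := ih (types ++ [(h, 1)]) (if h == 0 then jokers + 1 else jokers) hnd2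
      refine ⟨?_, ?_, ?_⟩
      · rw [hJ]
        by_cases h0 : h = 0 <;> simp [h0, List.count_cons] <;> push_cast <;> ring
      · intro v
        rw [hK v]
        simp only [List.map_append, List.map_cons, List.map_nil, List.mem_append,
          List.mem_cons, List.not_mem_nil, or_false]
        tauto
      · intro t ht
        rcases hV t ht with ⟨t0, ht0, he, hc⟩ | ⟨hk, hc⟩
        · rcases List.mem_append.1 ht0 with h1 | h1
          · -- old entry: its key differs from h
            have hne : t.1 ≠ h := by
              intro e
              exact hnot (e ▸ he ▸ List.mem_map_of_mem h1)
            refine Or.inl ⟨t0, h1, he, ?_⟩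
            rw [hc]
            simp [List.count_cons, hne, Ne.symm hne]
          · -- the new (h,1) entry
            simp only [List.mem_singleton] at h1
            subst h1
            refine Or.inr ⟨he ▸ hnot, ?_⟩
            rw [hc, ← he]
            simp [List.count_cons]
            push_cast; ring
        · have hne : t.1 ≠ h := by
            intro e
            exact hk (by simp [e])
          have hk' : t.1 ∉ types.map Prod.fst := fun hx => hk (by simp [hx])
          refine Or.inr ⟨hk', ?_⟩
          rw [hc]
          simp [List.count_cons, hne, Ne.symm hne]
    · -- h already a key: every matching entry incremented, keys unchanged
      have hin : h ∈ types.map Prod.fst := by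
        by_contra hx
        exact ha ((pvInnerA_snd h types).2 hx)
      have hfst : (pvInnerA h types).1 = types.map (fun t => if t.1 = h then (t.1, t.2 + 1) else t) :=
        pvInnerA_fst h types
      have hkeys : (pvInnerA h types).1.map Prod.fst = types.map Prod.fst := by
        rw [hfst, List.map_map]
        apply List.map_congr_left
        intro t _
        by_cases e : t.1 = h <;> simp [e]
      have ha' : (pvInnerA h types).2 = false := by
        revert ha; cases (pvInnerA h types).2 <;> simp
      have hstep : pvLoopA (h :: r) (types, jokers)
          = pvLoopA r ((pvInnerA h types).1, if h == 0 then jokers + 1 else jokers) := by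
        simp [pvLoopA, ha']
      rw [hstep]
      obtain ⟨hJ, hK, hV⟩ := ih (pvInnerA h types).1 (if h == 0 then jokers + 1 else jokers)
        (hkeys ▸ hnd)
      refine ⟨?_, ?_, ?_⟩
      · rw [hJ]
        by_cases h0 : h = 0 <;> simp [h0, List.count_cons] <;> push_cast <;> ring
      · intro v
        rw [hK v, hkeys]
        simp only [List.mem_cons]
        constructor
        · tauto
        · rintro (hv | rfl | hv)
          exacts [Or.inl hv, Or.inl hin, Or.inr hv]
      · intro t ht
        rcases hV t ht with ⟨t0, ht0, he, hc⟩ | ⟨hk, hc⟩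
        · rw [hfst] at ht0
          rcases List.mem_map.1 ht0 with ⟨t1, ht1, he1⟩
          by_cases e : t1.1 = h
          · have ht0eq : t0 = (t1.1, t1.2 + 1) := by rw [← he1]; simp [e]
            have hte : t.1 = h := by rw [← he, ht0eq]; exact e
            refine Or.inl ⟨t1, ht1, by rw [← he, ht0eq], ?_⟩
            rw [hc, ht0eq]
            simp [List.count_cons, hte]
            push_cast; ring
          · have ht0eq : t0 = t1 := by rw [← he1]; simp [e]
            have hte : t.1 ≠ h := by rw [← he, ht0eq]; exact e
            refine Or.inl ⟨t1, ht1, by rw [← ht0eq]; exact he, ?_⟩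
            rw [hc, ht0eq]
            simp [List.count_cons, hte, Ne.symm hte]
        · rw [hkeys] at hk
          have hte : t.1 ≠ h := fun e => hk (e ▸ hin)
          refine Or.inr ⟨hk, ?_⟩
          rw [hc]
          simp [List.count_cons, hte, Ne.symm hte]

lemma three_pair_iff (hand : List Int) : three_pair hand = true ↔ pvG hand := by
  unfold three_pair
  obtain ⟨hJ, hK, hV⟩ := pvLoopA_spec hand [] 0 (by simp)
  rw [pvFinalA_iff]
  constructor
  · rintro ⟨t, ht, h3⟩
    rcases hV t ht with ⟨t0, ht0, -, -⟩ | ⟨-, hc⟩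
    · simp at ht0
    · rw [hc, hJ] at h3
      refine ⟨t.1, ?_, by omega⟩
      have := (hK t.1).1 (List.mem_map_of_mem ht)
      simpa using this
  · rintro ⟨v, hv, h3⟩
    have hvk : v ∈ (pvLoopA hand ([], 0)).1.map Prod.fst := (hK v).2 (Or.inr hv)
    rcases List.mem_map.1 hvk with ⟨t, ht, he⟩
    refine ⟨t, ht, ?_⟩
    rcases hV t ht with ⟨t0, ht0, -, -⟩ | ⟨-, hc⟩
    · simp at ht0
    · rw [hc, hJ, he]; omega

lemma pvRunB_iff (j : Int) (s : List Int) (cur run : Int)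
    (hs : s.Pairwise (· ≤ ·)) (hge : ∀ y ∈ s, cur ≤ y) :
    pvRunB j s cur run = true ↔
      run + (s.count cur : Int) + j = 3 ∨ ∃ v ∈ s, cur < v ∧ (s.count v : Int) + j = 3 := by
  induction s generalizing cur run with
  | nil => simp [pvRunB]
  | cons x xs ih =>
    rcases List.pairwise_cons.1 hs with ⟨hx, hxs⟩
    by_cases e : x = cur
    · subst e
      simp only [pvRunB, beq_self_eq_true, if_pos]
      rw [ih x (run + 1) hxs hx]
      constructor
      · rintro (h3 | ⟨v, hv, hlt, h3⟩)
        · left; simp [List.count_cons] at h3 ⊢; push_cast at h3 ⊢; omega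
        · right
          refine ⟨v, List.mem_cons_of_mem _ hv, hlt, ?_⟩
          have : v ≠ x := ne_of_gt hlt
          simpa [List.count_cons, this, Ne.symm this] using h3
      · rintro (h3 | ⟨v, hv, hlt, h3⟩)
        · left; simp [List.count_cons] at h3 ⊢; push_cast at h3 ⊢; omega
        · right
          have hvx : v ≠ x := ne_of_gt hlt
          rcases List.mem_cons.1 hv with hv | hv
          · exact absurd hv hvx
          · refine ⟨v, hv, hlt, by simpa [List.count_cons, hvx, Ne.symm hvx] using h3⟩
    · have hne : (x == cur) = false := by simp [e]
      have hlt : cur < x := lt_of_le_of_ne (hge x (List.mem_cons_self)) (fun h => e h.symm)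
      have hcur0 : xs.count cur = 0 := by
        rw [List.count_eq_zero]
        intro hc
        exact absurd (lt_of_lt_of_le hlt (hx cur hc)) (lt_irrefl cur)
      simp only [pvRunB, hne, Bool.false_eq_true, if_false]
      by_cases h3 : run + j = 3
      · rw [if_pos (show (run + j == 3) = true by simpa using h3)]
        constructor
        · intro _
          left
          simp [List.count_cons, Ne.symm e, hcur0]
          omega
        · intro _
          rfl
      · have : (run + j == 3) = false := by simp [h3]
        simp only [this, Bool.false_eq_true, if_false]
        rw [ih x 1 hxs (fun y hy => hx y hy)]
        constructor
        · rintro (hc | ⟨v, hv, hvlt, hc⟩)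
          · right
            refine ⟨x, List.mem_cons_self, hlt, ?_⟩
            simp [List.count_cons] at hc ⊢; push_cast at hc ⊢; omega
          · right
            have hvx : v ≠ x := ne_of_gt hvlt
            exact ⟨v, List.mem_cons_of_mem _ hv, lt_trans hlt hvlt,
              by simpa [List.count_cons, hvx, Ne.symm hvx] using hc⟩
        · rintro (hc | ⟨v, hv, hvlt, hc⟩)
          · exfalso
            simp [List.count_cons, Ne.symm e, hcur0] at hc
            exact h3 (by omega)
          · rcases List.mem_cons.1 hv with hv | hv
            · subst hv
              left
              simp [List.count_cons] at hc ⊢; push_cast at hc ⊢; omega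
            · by_cases evx : v = x
              · subst evx
                left
                simp [List.count_cons] at hc ⊢; push_cast at hc ⊢; omega
              · have hvgt : x < v := lt_of_le_of_ne (hx v hv) (fun h => evx h.symm)
                right
                exact ⟨v, hv, hvgt, by simpa [List.count_cons, evx, Ne.symm evx] using hc⟩

lemma three_pair_alt_iff (hand : List Int) : three_pair_alt hand = true ↔ pvG hand := by
  unfold three_pair_alt
  have hperm : (PySem.List.sorted hand (fun x => x) false).Perm hand := PySem.List.sorted_perm hand (fun x => x) false
  cases hS : PySem.List.sorted hand (fun x => x) false with
  | nil =>
    have : hand = [] := by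
      have := hS ▸ hperm
      exact this.symm.eq_nil
    simp [this, pvG]
  | cons c rest =>
    have hpw : (c :: rest).Pairwise (fun a b : Int => a ≤ b) := by
      have := PySem.List.sorted_pairwise (xs := hand) (key := fun x : Int => x)
      rw [hS] at this
      exact this
    rcases List.pairwise_cons.1 hpw with ⟨hc, hrest⟩
    have hpm : (c :: rest).Perm hand := hS ▸ hperm
    have hcount : ∀ v : Int, (c :: rest).count v = hand.count v := fun v => hpm.count_eq v
    have hmem : ∀ v : Int, v ∈ c :: rest ↔ v ∈ hand := fun v => hpm.mem_iff
    rw [pvRunB_iff _ rest c 1 hrest hc]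
    unfold pvG
    constructor
    · rintro (h3 | ⟨v, hv, hvlt, h3⟩)
      · refine ⟨c, (hmem c).1 (List.mem_cons_self), ?_⟩
        rw [← hcount c]
        simp [List.count_cons] at h3 ⊢; push_cast at h3 ⊢; omega
      · have hvc : v ≠ c := ne_of_gt hvlt
        refine ⟨v, (hmem v).1 (List.mem_cons_of_mem _ hv), ?_⟩
        rw [← hcount v]
        simpa [List.count_cons, hvc, Ne.symm hvc] using h3
    · rintro ⟨v, hv, h3⟩
      rw [← hcount v] at h3
      rcases List.mem_cons.1 ((hmem v).2 hv) with hv' | hv'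
      · subst hv'
        left
        simp [List.count_cons] at h3 ⊢; push_cast at h3 ⊢; omega
      · by_cases evc : v = c
        · subst evc
          left
          simp [List.count_cons] at h3 ⊢; push_cast at h3 ⊢; omega
        · have : c < v := lt_of_le_of_ne (hc v hv') (fun h => evc h.symm)
          right
          exact ⟨v, hv', this, by simpa [List.count_cons, evc, Ne.symm evc] using h3⟩

-- ===== VERDICT (by name: the statement is the Claim_ definition above) =====
theorem three_pair_spec : Claim_equal_three_pair := by
  intro hand _
  unfold Spec_three_pair
  by_cases h : pvG hand
  · rw [(three_pair_iff hand).2 h, ((three_pair_alt_iff hand).2 h)]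
  · have h1 : three_pair hand ≠ true := fun hx => h ((three_pair_iff hand).1 hx)
    have h2 : three_pair_alt hand ≠ true := fun hx => h ((three_pair_alt_iff hand).1 hx)
    simp [Bool.not_eq_true] at h1 h2
    rw [h1, h2]
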